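-- pv_equiv track=rewrite | github.com/GagoilKim/Programmers_Algorithm | IronStick.py | solution
-- ===== SOURCE A (Python) =====
-- def solution(arrangement):
--     answer = 0
--     bar = 0
--     arrangement = arrangement.replace("()", "R")
--     for x in arrangement:
--         if x == "(":
--             bar+=1
--         elif x == ")":
--             bar-=1
--             answer+=1
--         else:
--             answer+=bar
--     return answer
-- ===== SOURCE B (Python) =====
-- def solution(arrangement):
--     answer = 0
--     open_ = 0
--     prev = ''
--     for c in arrangement:
--         if c == '(':
--             open_ += 1
--         elif c == ')':
--             open_ -= 1
--             answer += open_ if prev == '(' else 1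
--         else:
--             answer += open_
--         prev = c
--     return answer
-- ===== Notes on version B (the rewrite author's own statement) =====
-- stated objective: idiomatic
-- what changed: Replaces A's two-pass scheme (a string-replace preprocessing pass that rewrites each laser pair to a marker character, then a fold over the rewritten string) by a single pass over the raw string that detects a laser by remembering the previous character, building no intermediate string.
import Mathlib
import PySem

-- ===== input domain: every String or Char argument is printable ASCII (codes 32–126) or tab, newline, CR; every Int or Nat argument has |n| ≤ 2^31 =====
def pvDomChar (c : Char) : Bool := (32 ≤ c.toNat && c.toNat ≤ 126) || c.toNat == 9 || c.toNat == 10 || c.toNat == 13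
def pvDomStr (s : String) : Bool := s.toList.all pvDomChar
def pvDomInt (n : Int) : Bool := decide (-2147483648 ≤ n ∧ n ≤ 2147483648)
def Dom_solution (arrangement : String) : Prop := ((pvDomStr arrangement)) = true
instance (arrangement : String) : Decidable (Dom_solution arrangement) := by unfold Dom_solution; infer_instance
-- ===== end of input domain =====

-- B replaces A's string-replace preprocessing pass + fold over the marker string by a single
-- pass over the raw string that remembers the previous character to detect a laser (idiomatic).


-- ===== PORT A =====
-- loop body of A: state = (answer, bar)
def stepA (st : Int × Int) (x : Char) : Int × Int :=
  if x = '(' then (st.1, st.2 + 1)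
  else if x = ')' then (st.1 + 1, st.2 - 1)
  else (st.1 + st.2, st.2)

def solution (arrangement : String) : Int :=
  ((PySem.Str.replace arrangement "()" "R").toList.foldl stepA ((0 : Int), (0 : Int))).1

-- ===== PORT B =====
-- loop body of B: state = (answer, open_, prev)
def stepB (st : Int × Int × String) (c : Char) : Int × Int × String :=
  if c = '(' then (st.1, st.2.1 + 1, String.ofList [c])
  else if c = ')' then
    ((if st.2.2 = "(" then st.1 + (st.2.1 - 1) else st.1 + 1), st.2.1 - 1, String.ofList [c])
  else (st.1 + st.2.1, st.2.1, String.ofList [c])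

def solution_alt (arrangement : String) : Int :=
  (arrangement.toList.foldl stepB ((0 : Int), (0 : Int), "")).1

-- ===== PRECONDITION & SPEC =====
def Spec_solution (arrangement : String) (out : Int) : Prop := out = solution_alt arrangement
instance (arrangement : String) (out : Int) : Decidable (Spec_solution arrangement out) := by unfold Spec_solution; infer_instance

-- ===== CLAIM (what is proved, stated in full; the proofs are below) =====
def Claim_equal_solution : Prop := ∀ (arrangement : String), Dom_solution arrangement → Spec_solution arrangement (solution arrangement)

-- ===== LEMMAS AND PROOFS =====

theorem mk_eq_paren {a : Char} (h : String.ofList [a] = "(") : a = '(' := by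
  have := congrArg String.toList h
  simpa using this

-- the effect of s.replace("()", "R") on the character list
def repl : List Char → List Char
  | [] => []
  | [c] => [c]
  | a :: b :: t => if a = '(' ∧ b = ')' then 'R' :: repl t else a :: repl (b :: t)

theorem repl_cons_of_not_laser (a : Char) (t : List Char)
    (h : ¬ (a = '(' ∧ t.head? = some ')')) : repl (a :: t) = a :: repl t := by
  match t with
  | [] => rfl
  | b :: t2 =>
    simp only [List.head?] at h
    simp only [repl]
    rw [if_neg]
    intro ⟨h1, h2⟩; exact h ⟨h1, by simp [h2]⟩

theorem go_spec (fuel : Nat) : ∀ (l acc : List Char), l.length ≤ fuel →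
    PySem.Chars.replace.go ['(', ')'] ['R'] fuel l acc = acc.reverse ++ repl l := by
  induction fuel with
  | zero =>
    intro l acc h
    have : l = [] := List.eq_nil_of_length_eq_zero (Nat.le_zero.mp h)
    subst this
    simp [PySem.Chars.replace.go, repl]
  | succ fuel ih =>
    intro l acc h
    match l with
    | [] => simp [PySem.Chars.replace.go, repl]
    | a :: t =>
      rw [PySem.Chars.replace.go]
      by_cases hp : ['(', ')'].isPrefixOf (a :: t) = true
      · rw [if_pos hp]
        obtain ⟨b, t2, rfl, rfl, rfl⟩ : ∃ b t2, a = '(' ∧ t = b :: t2 ∧ b = ')' := by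
          cases t with
          | nil => simp [List.isPrefixOf] at hp
          | cons b t2 =>
            simp [List.isPrefixOf] at hp
            exact ⟨b, t2, hp.1.symm, rfl, hp.2.symm⟩
        simp only [List.length_cons] at h
        rw [show (['(', ')'] : List Char).length = 2 from rfl]
        simp only [List.drop_succ_cons, List.drop_zero]
        rw [ih t2 (['R'].reverse ++ acc) (by omega)]
        simp [repl]
      · rw [if_neg hp]
        rw [ih t (a :: acc) (by simpa using Nat.le_of_succ_le_succ h)]
        rw [repl_cons_of_not_laser]
        · simp
        · intro ⟨h1, h2⟩
          apply hp
          cases t with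
          | nil => simp at h2
          | cons b t2 =>
            simp [List.head?] at h2
            simp [List.isPrefixOf, h1, h2]

theorem replace_toList (s : String) :
    (PySem.Str.replace s "()" "R").toList = repl s.toList := by
  unfold PySem.Str.replace PySem.Chars.replace
  rw [if_neg (by decide)]
  have h : ("()" : String).toList = ['(', ')'] := by decide
  have h2 : ("R" : String).toList = ['R'] := by decide
  rw [h, h2, go_spec s.toList.length s.toList [] le_rfl]
  simp

theorem main_lemma (fuel : Nat) : ∀ (l : List Char) (ans opn : Int) (p : String),
    l.length ≤ fuel → (p = "(" → l.head? ≠ some ')') →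
    (List.foldl stepB (ans, opn, p) l).1 = (List.foldl stepA (ans, opn) (repl l)).1 := by
  induction fuel with
  | zero =>
    intro l ans opn p h _
    have : l = [] := List.eq_nil_of_length_eq_zero (Nat.le_zero.mp h)
    subst this; rfl
  | succ fuel ih =>
    intro l ans opn p h hp
    match l with
    | [] => rfl
    | a :: t =>
      by_cases hl : a = '(' ∧ t.head? = some ')'
      · obtain ⟨rfl, h2⟩ := hl
        obtain ⟨t2, rfl⟩ : ∃ t2, t = ')' :: t2 := by
          cases t with
          | nil => simp at h2
          | cons b t2 => simp [List.head?] at h2; exact ⟨t2, by rw [h2]⟩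
        rw [show repl ('(' :: ')' :: t2) = 'R' :: repl t2 from by simp [repl]]
        simp only [List.foldl_cons]
        have e1 : stepB (stepB (ans, opn, p) '(') ')' = (ans + opn, opn, String.ofList [')']) := by
          have h1 : stepB (ans, opn, p) '(' = (ans, opn + 1, String.ofList ['(']) := by
            simp [stepB]
          rw [h1]
          have hpar : (String.ofList ['('] : String) = "(" := by decide
          simp [stepB, hpar]
        have e2 : stepA (ans, opn) 'R' = (ans + opn, opn) := by simp [stepA]
        rw [e1, e2]
        apply ih t2 (ans + opn) opn (String.ofList [')']) (by simp at h; omega)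
        intro hq; exact absurd (mk_eq_paren hq) (by decide)
      · rw [repl_cons_of_not_laser a t hl]
        simp only [List.foldl_cons]
        have hnext : String.ofList [a] = "(" → t.head? ≠ some ')' := by
          intro hq
          have : a = '(' := mk_eq_paren hq
          intro hh; exact hl ⟨this, hh⟩
        by_cases ha : a = '('
        · subst ha
          have e1 : stepB (ans, opn, p) '(' = (ans, opn + 1, String.ofList ['(']) := by
            simp [stepB]
          have e2 : stepA (ans, opn) '(' = (ans, opn + 1) := by simp [stepA]
          rw [e1, e2]
          exact ih t ans (opn + 1) _ (by simp at h; omega) hnext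
        · by_cases hb : a = ')'
          · subst hb
            have hpne : p ≠ "(" := fun hq => (hp hq) rfl
            have e1 : stepB (ans, opn, p) ')' = (ans + 1, opn - 1, String.ofList [')']) := by
              simp [stepB, hpne]
            have e2 : stepA (ans, opn) ')' = (ans + 1, opn - 1) := by simp [stepA]
            rw [e1, e2]
            exact ih t (ans + 1) (opn - 1) _ (by simp at h; omega) hnext
          · have e1 : stepB (ans, opn, p) a = (ans + opn, opn, String.ofList [a]) := by
              simp [stepB, ha, hb]
            have e2 : stepA (ans, opn) a = (ans + opn, opn) := by simp [stepA, ha, hb]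
            rw [e1, e2]
            exact ih t (ans + opn) opn _ (by simp at h; omega) hnext

-- ===== VERDICT (by name: the statement is the Claim_ definition above) =====
theorem solution_spec : Claim_equal_solution := by
  intro s _
  show solution s = solution_alt s
  unfold solution solution_alt
  rw [replace_toList]
  rw [← main_lemma s.toList.length s.toList 0 0 "" le_rfl (by intro h; simp at h)]
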